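-- pv_equiv track=rewrite | github.com/rand-projects/fisb-decode | fisb/level0/utilities.py | textToDlac
-- ===== SOURCE A (Python) =====
-- dlacString = "~ABCDEFGHIJKLMNOPQRSTUVWXYZ~\t~\n| !\"#$%&'()*+,-./0123456789:;<=>?"
--
-- def textToDlac(str):
--     # Make sure string length is divisible by three.
--     while (len(str) % 4) != 0:
--         str = str + '~'
--
--     # Make upper case
--     str = str.upper()
--
--     # Get number of bytes this will turn into (4 characters in 3 bytes)
--     byteCount = int((len(str) / 4) * 3)
--
--     # Number of bytes to encode.
--     ba = bytearray(byteCount)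
--
--     # Loop for each 4 characters, make 1 3-byte set.
--     baIdx = 0
--     strIdx = 0
--     for _ in range(0, int(byteCount / 3)):
--         c1 = dlacString.index(str[strIdx])
--         c2 = dlacString.index(str[strIdx + 1])
--         c3 = dlacString.index(str[strIdx + 2])
--         c4 = dlacString.index(str[strIdx + 3])
--
--         strIdx += 4
--
--         ba[baIdx] = (c1 << 2) | ((c2 & 0x30) >> 4)
--         ba[baIdx + 1] = ((c2 & 0x0F) << 4) | ((c3 & 0x3C) >> 2)
--         ba[baIdx + 2] = ((c3 & 0x3) << 6) | c4
--
--         baIdx += 3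
--
--     return ba.hex()
-- ===== SOURCE B (Python) =====
-- dlacString = "~ABCDEFGHIJKLMNOPQRSTUVWXYZ~\t~\n| !\"#$%&'()*+,-./0123456789:;<=>?"
--
-- def textToDlac(str):
--     # Make sure string length is divisible by three.
--     while (len(str) % 4) != 0:
--         str = str + '~'
--
--     # Make upper case
--     str = str.upper()
--
--     # Two 6-bit codes are exactly three hex digits: emit the hex string directly,
--     # one 12-bit pair at a time, with no intermediate byte buffer.
--     return ''.join(
--         format((dlacString.index(str[i]) << 6) | dlacString.index(str[i + 1]), '03x')
--         for i in range(0, len(str), 2))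
-- ===== Notes on version B (the rewrite author's own statement) =====
-- stated objective: alternative
-- what changed: Replaces the 4-chars-to-3-bytes mask-and-shift bytearray construction plus bytes.hex() with a direct hex emitter: each 2-character 12-bit pair is formatted as exactly three hex digits and joined, so no byte buffer and no per-byte bit masks exist.
import Mathlib
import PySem

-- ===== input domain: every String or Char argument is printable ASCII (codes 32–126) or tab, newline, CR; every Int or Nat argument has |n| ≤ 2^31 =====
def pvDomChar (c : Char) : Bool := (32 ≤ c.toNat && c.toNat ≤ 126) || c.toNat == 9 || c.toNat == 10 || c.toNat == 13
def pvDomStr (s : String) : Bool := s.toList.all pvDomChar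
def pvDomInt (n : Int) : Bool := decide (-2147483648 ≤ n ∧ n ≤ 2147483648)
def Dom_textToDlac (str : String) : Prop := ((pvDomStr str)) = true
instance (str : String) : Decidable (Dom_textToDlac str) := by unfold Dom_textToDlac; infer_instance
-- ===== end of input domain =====

-- B replaces A's per-group mask/shift bytearray construction (and bytes.hex()) by emitting
-- three hex digits per 12-bit pair of 6-bit codes directly (objective: alternative).

-- shared context: the DLAC alphabet (module constant) and faithful ports of the shared
-- Python front-end (the '~'-padding while-loop, str.upper, ba.hex()/bytes.hex()).
def dlacChars : List Char :=
  "~ABCDEFGHIJKLMNOPQRSTUVWXYZ~\t~\n| !\"#$%&'()*+,-./0123456789:;<=>?".toList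

-- the padding while-loop: while len(str) % 4 != 0: str = str + '~'
-- (fuel 4 only bounds the recursion: at most 3 pads are ever needed, the loop itself is unchanged)
def padDlacFuel : Nat → List Char → List Char
  | 0, l => l
  | fuel + 1, l => if l.length % 4 = 0 then l else padDlacFuel fuel (l ++ ['~'])

def padDlac (l : List Char) : List Char := padDlacFuel 4 l

-- dlacString.index(ch); Pre_ excludes the ValueError (none) case, getD 0 is never hit there
def dlacIdx (c : Char) : Nat := (PySem.List.index? dlacChars c).getD 0

-- bytes.hex(): two lowercase hex digits per byte
def hexDigit (n : Nat) : Char := if n < 10 then Char.ofNat (48 + n) else Char.ofNat (87 + n)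
def hexOfBytes (bs : List Nat) : String :=
  String.ofList (bs.flatMap (fun b => [hexDigit (b / 16), hexDigit (b % 16)]))

-- ===== PORT A =====
-- the for-loop over range(byteCount/3): each iteration consumes 4 chars and emits 3 bytes
def dlacGroups (l : List Char) : List Nat :=
  match l with
  | ch1 :: ch2 :: ch3 :: ch4 :: rest =>
    let c1 := dlacIdx ch1
    let c2 := dlacIdx ch2
    let c3 := dlacIdx ch3
    let c4 := dlacIdx ch4
    ((c1 <<< 2) ||| ((c2 &&& 0x30) >>> 4)) ::
    (((c2 &&& 0x0F) <<< 4) ||| ((c3 &&& 0x3C) >>> 2)) ::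
    (((c3 &&& 0x3) <<< 6) ||| c4) :: dlacGroups rest
  | _ => []

def textToDlac (str : String) : String :=
  let padded := padDlac str.toList
  let up := (PySem.Str.upper (String.ofList padded)).toList
  hexOfBytes (dlacGroups up)

-- ===== PORT B =====
-- format(g, '03x'): the three hex digits of a 12-bit value
def hex3 (g : Nat) : List Char := [hexDigit (g / 256), hexDigit (g / 16 % 16), hexDigit (g % 16)]

-- the generator over range(0, len(str), 2): one 12-bit pair -> three hex digits
def pairHex : List Char → List Char
  | c1 :: c2 :: rest => hex3 ((dlacIdx c1 <<< 6) ||| dlacIdx c2) ++ pairHex rest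
  | _ => []

def textToDlac_alt (str : String) : String :=
  let padded := padDlac str.toList
  let up := (PySem.Str.upper (String.ofList padded)).toList
  String.ofList (pairHex up)

-- ===== PRECONDITION & SPEC =====
-- Pre_ excludes exactly the inputs on which Python A raises ValueError:
-- some character, after uppercasing, is not in dlacString (padding '~' is always in it).
def Pre_textToDlac (str : String) : Prop :=
  ((PySem.Str.upper str).toList.all (fun c => c ∈ dlacChars)) = true
instance (str : String) : Decidable (Pre_textToDlac str) := by unfold Pre_textToDlac; infer_instance
def pvWitness_textToDlac : String := "Hello, world 42?"

def Spec_textToDlac (str : String) (out : String) : Prop := out = textToDlac_alt str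
instance (str : String) (out : String) : Decidable (Spec_textToDlac str out) := by unfold Spec_textToDlac; infer_instance

-- ===== CLAIM (what is proved, stated in full; the proofs are below) =====
def Claim_equal_textToDlac : Prop := ∀ (str : String), Dom_textToDlac str → Pre_textToDlac str → Spec_textToDlac str (textToDlac str)

-- ===== LEMMAS AND PROOFS =====

lemma dlacIdx_lt (c : Char) : dlacIdx c < 64 := by
  unfold dlacIdx
  rcases h : PySem.List.index? dlacChars c with _ | k
  · simp
  · have := PySem.List.getElem_of_index?_eq_some h
    obtain ⟨hk, -⟩ := this
    simpa [dlacChars] using hk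

lemma padDlac_len (l : List Char) : (padDlac l).length % 4 = 0 := by
  unfold padDlac
  rcases h : l.length % 4 with _ | _ | _ | _ | k
  all_goals simp [padDlacFuel, h, Nat.add_mod]
  omega

lemma mask30 : ∀ c < 64, c &&& 48 = c / 16 * 16 := by decide
lemma mask0F : ∀ c < 64, c &&& 15 = c % 16 := by decide
lemma mask3C : ∀ c < 64, c &&& 60 = c / 4 * 4 := by decide
lemma mask03 : ∀ c < 64, c &&& 3 = c % 4 := by decide

lemma byteA1 (c1 c2 : Nat) (_h1 : c1 < 64) (h2 : c2 < 64) :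
    (c1 <<< 2) ||| ((c2 &&& 48) >>> 4) = c1 * 4 + c2 / 16 := by
  rw [mask30 c2 h2, Nat.shiftRight_eq_div_pow, show c2 / 16 * 16 / 2 ^ 4 = c2 / 16 by omega,
    ← Nat.shiftLeft_add_eq_or_of_lt (by omega : c2 / 16 < 2 ^ 2), Nat.shiftLeft_eq]

lemma byteA2 (c2 c3 : Nat) (h2 : c2 < 64) (h3 : c3 < 64) :
    ((c2 &&& 15) <<< 4) ||| ((c3 &&& 60) >>> 2) = c2 % 16 * 16 + c3 / 4 := by
  rw [mask0F c2 h2, mask3C c3 h3, Nat.shiftRight_eq_div_pow,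
    show c3 / 4 * 4 / 2 ^ 2 = c3 / 4 by omega,
    ← Nat.shiftLeft_add_eq_or_of_lt (by omega : c3 / 4 < 2 ^ 4), Nat.shiftLeft_eq]

lemma byteA3 (c3 c4 : Nat) (h3 : c3 < 64) (h4 : c4 < 64) :
    ((c3 &&& 3) <<< 6) ||| c4 = c3 % 4 * 64 + c4 := by
  rw [mask03 c3 h3, ← Nat.shiftLeft_add_eq_or_of_lt (by omega : c4 < 2 ^ 6), Nat.shiftLeft_eq]

lemma pairVal (c1 c2 : Nat) (h2 : c2 < 64) : (c1 <<< 6) ||| c2 = c1 * 64 + c2 := by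
  rw [← Nat.shiftLeft_add_eq_or_of_lt (by omega : c2 < 2 ^ 6), Nat.shiftLeft_eq]

-- A's byte stream, rendered as hex digit pairs, is B's pair-wise hex stream
lemma main_eq : ∀ l : List Char, l.length % 4 = 0 →
    (dlacGroups l).flatMap (fun b => [hexDigit (b / 16), hexDigit (b % 16)]) = pairHex l
  | [], _ => by simp [dlacGroups, pairHex]
  | [a], h => by simp at h
  | [a, b], h => by simp at h
  | [a, b, c], h => by simp at h
  | (a :: b :: c :: d :: t), h => by
    have ht : t.length % 4 = 0 := by simp at h; omega
    have ih := main_eq t ht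
    have hi1 := dlacIdx_lt a
    have hi2 := dlacIdx_lt b
    have hi3 := dlacIdx_lt c
    have hi4 := dlacIdx_lt d
    show (dlacGroups (a :: b :: c :: d :: t)).flatMap _ = pairHex (a :: b :: c :: d :: t)
    simp only [dlacGroups, pairHex, hex3]
    rw [byteA1 _ _ hi1 hi2, byteA2 _ _ hi2 hi3, byteA3 _ _ hi3 hi4,
      pairVal _ _ hi2, pairVal _ _ hi4]
    simp only [List.flatMap_cons, List.cons_append, List.nil_append]
    rw [ih]
    refine congrArg₂ _ (congrArg _ (by omega)) ?_
    refine congrArg₂ _ (congrArg _ (by omega)) ?_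
    refine congrArg₂ _ (congrArg _ (by omega)) ?_
    refine congrArg₂ _ (congrArg _ (by omega)) ?_
    refine congrArg₂ _ (congrArg _ (by omega)) ?_
    exact congrArg₂ _ (congrArg _ (by omega)) rfl

-- ===== VERDICT (by name: the statement is the Claim_ definition above) =====
theorem textToDlac_spec : Claim_equal_textToDlac := by
  intro str _ _
  unfold Spec_textToDlac textToDlac textToDlac_alt
  simp only
  have hmk : (String.ofList (padDlac str.toList)).toList = padDlac str.toList := by simp
  have hup : ∀ l : List Char, (PySem.Chars.upper l).length = l.length := by
    intro l; simp [PySem.Chars.upper]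
  have hlen : (PySem.Str.upper (String.ofList (padDlac str.toList))).toList.length % 4 = 0 := by
    rw [PySem.Str.toList_upper, hmk, hup]
    exact padDlac_len str.toList
  rw [hexOfBytes, ← main_eq _ hlen]
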